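-- pv_equiv track=rewrite | github.com/jua16073/lenguajes_proy2 | decomp.py | read_word
-- ===== SOURCE A (Python) =====
-- def read_word(file, actual):
--     temp_word = ""
--     while actual < len(file):
--         if (file[actual] == " " or file[actual] == "\n") and (len(temp_word) > 0):
--             break
--         elif file[actual] == " " or file[actual] == "\n":
--             actual += 1
--         else:
--             temp_word += file[actual]
--             actual += 1
--     return temp_word, actual
-- ===== SOURCE B (Python) =====
-- def read_word(file, actual):
--     n = len(file)
--     while actual < n and (file[actual] == " " or file[actual] == "\n"):
--         actual += 1
--     chars = []
--     while actual < n and file[actual] != " " and file[actual] != "\n":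
--         chars.append(file[actual])
--         actual += 1
--     return "".join(chars), actual
-- ===== Notes on version B (the rewrite author's own statement) =====
-- stated objective: simpler
-- what changed: Replaces A's single while loop that mixes skipping and collecting via a 'break if whitespace and word already non-empty' flag check with two plain phases: one loop skipping ' '/'\n', then one loop collecting word characters into a list joined once (A's repeated string += is quadratic in the word length).
import Mathlib
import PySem

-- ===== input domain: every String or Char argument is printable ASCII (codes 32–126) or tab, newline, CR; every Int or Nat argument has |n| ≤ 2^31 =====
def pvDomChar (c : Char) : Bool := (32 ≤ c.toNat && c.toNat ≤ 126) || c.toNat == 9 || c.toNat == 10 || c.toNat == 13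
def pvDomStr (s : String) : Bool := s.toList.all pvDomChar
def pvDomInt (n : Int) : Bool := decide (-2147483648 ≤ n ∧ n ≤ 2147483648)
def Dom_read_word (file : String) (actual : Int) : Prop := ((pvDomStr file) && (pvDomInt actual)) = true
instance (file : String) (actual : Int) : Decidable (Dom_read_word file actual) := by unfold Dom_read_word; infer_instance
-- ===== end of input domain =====

-- B reads the token in two phases (skip whitespace, then collect the word) instead of A's
-- single loop with flag-dependent break, collecting chars in a list (A's string += is quadratic in the word). A=B wherever A returns.

-- ===== PORT A =====
-- A's while loop: state (temp_word, actual); bails out (returning current state) where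
-- Python's file[actual] would raise IndexError — such inputs are excluded by Pre_read_word.
def readWordLoopA (file : List Char) (temp : List Char) (actual : Int) : List Char × Int :=
  if _h : actual < (file.length : Int) then
    match PySem.List.pyGet? file actual with
    | none => (temp, actual)
    | some c =>
      if (c = ' ' ∨ c = '\n') ∧ temp.length > 0 then (temp, actual)
      else if c = ' ' ∨ c = '\n' then readWordLoopA file temp (actual + 1)
      else readWordLoopA file (temp ++ [c]) (actual + 1)
  else (temp, actual)
termination_by ((file.length : Int) - actual).toNat
decreasing_by all_goals omega

def read_word (file : String) (actual : Int) : String × Int :=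
  let r := readWordLoopA file.toList [] actual
  (String.ofList r.1, r.2)

-- ===== PORT B =====
-- first loop of Source B: advance actual while it points at ' ' or '\n'
def skipLoopB (file : List Char) (actual : Int) : Int :=
  if _h : actual < (file.length : Int) then
    match PySem.List.pyGet? file actual with
    | none => actual
    | some c => if c = ' ' ∨ c = '\n' then skipLoopB file (actual + 1) else actual
  else actual
termination_by ((file.length : Int) - actual).toNat
decreasing_by all_goals omega

-- second loop of Source B: append chars to `chars` while not at ' '/'\n'
def collectLoopB (file : List Char) (chars : List Char) (actual : Int) : List Char × Int :=
  if _h : actual < (file.length : Int) then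
    match PySem.List.pyGet? file actual with
    | none => (chars, actual)
    | some c =>
      if c ≠ ' ' ∧ c ≠ '\n' then collectLoopB file (chars ++ [c]) (actual + 1)
      else (chars, actual)
  else (chars, actual)
termination_by ((file.length : Int) - actual).toNat
decreasing_by all_goals omega

def read_word_alt (file : String) (actual : Int) : String × Int :=
  let s := skipLoopB file.toList actual
  let r := collectLoopB file.toList [] s
  (String.ofList r.1, r.2)

-- ===== PRECONDITION & SPEC =====
-- A raises IndexError exactly when actual < -len(file) (the first file[actual] is out of range;
-- actual only grows, so every later index is in range); B raises there too. Pre_ excludes exactly that.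
def Pre_read_word (file : String) (actual : Int) : Prop := -(file.toList.length : Int) ≤ actual
instance (file : String) (actual : Int) : Decidable (Pre_read_word file actual) := by unfold Pre_read_word; infer_instance
def pvWitness_read_word : String × Int := ("  hola\nmundo", 0)

def Spec_read_word (file : String) (actual : Int) (out : String × Int) : Prop := out = read_word_alt file actual
instance (file : String) (actual : Int) (out : String × Int) : Decidable (Spec_read_word file actual out) := by unfold Spec_read_word; infer_instance

-- ===== CLAIM (what is proved, stated in full; the proofs are below) =====
def Claim_equal_read_word : Prop := ∀ (file : String) (actual : Int), Dom_read_word file actual → Pre_read_word file actual → Spec_read_word file actual (read_word file actual)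

-- ===== LEMMAS AND PROOFS =====

-- Once a word has started (temp ≠ []), A's loop is exactly B's collect loop.
theorem loopA_eq_collect (file : List Char) (temp : List Char) (actual : Int)
    (h : temp ≠ []) : readWordLoopA file temp actual = collectLoopB file temp actual := by
  fun_induction readWordLoopA file temp actual with
  | case1 temp actual hlt hget => rw [collectLoopB]; simp [hlt, hget]
  | case2 temp actual hlt c hget hsp =>
      rw [collectLoopB]; simp only [hlt, hget, dif_pos]
      have : ¬ (c ≠ ' ' ∧ c ≠ '\n') := by tauto
      simp [this]
  | case3 temp actual hlt c hget hbrk hsp ih =>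
      exact absurd (by simpa using hsp.imp_right id) (by simp at h hbrk; tauto)
  | case4 temp actual hlt c hget hbrk hsp ih =>
      rw [collectLoopB]
      have hc : c ≠ ' ' ∧ c ≠ '\n' := by tauto
      simp only [hlt, hget, dif_pos]
      rw [if_pos hc]
      exact ih (by simp)
  | case5 temp actual hlt => rw [collectLoopB]; simp [hlt]

-- With temp = [], A's loop is skip-then-collect.
theorem loopA_eq_skip_collect (file : List Char) (actual : Int) :
    readWordLoopA file [] actual = collectLoopB file [] (skipLoopB file actual) := by
  fun_induction skipLoopB file actual with
  | case1 actual hlt hget => rw [readWordLoopA, collectLoopB]; simp [hlt, hget]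
  | case2 actual hlt c hget hsp ih =>
      rw [readWordLoopA]
      simp only [hlt, dif_pos, hget]
      rw [if_neg (by simp [hsp]), if_pos hsp]
      exact ih
  | case3 actual hlt c hget hsp =>
      rw [readWordLoopA, collectLoopB]
      simp only [hlt, dif_pos, hget]
      rw [if_neg (by simp [hsp]), if_neg hsp, if_pos (by tauto)]
      simpa using loopA_eq_collect file [c] (actual + 1) (by simp)
  | case4 actual hlt => rw [readWordLoopA, collectLoopB]; simp [hlt]

-- ===== VERDICT (by name: the statement is the Claim_ definition above) =====
theorem read_word_spec : Claim_equal_read_word := by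
  intro file actual _ _
  unfold Spec_read_word read_word read_word_alt
  rw [loopA_eq_skip_collect]
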